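-- pv_equiv track=rewrite | github.com/AkshayPratapSingh09/Dev-Revival | Day_6/interger_complement.py | decimal_to_Complement
-- ===== SOURCE A (Python) =====
-- def decimal_to_Complement(decimal_num):
--     binary_num = ""
--
--     # Step 1: Divide and Remainder
--     while decimal_num > 0:
--         remainder = decimal_num % 2
--         if int(remainder) == 1:
--             binary_num = str(0) + binary_num  # Step 4: Concatenate the remainders
--         else:
--             binary_num = str(1) + binary_num  # Step 4: Concatenate the remainders
--         decimal_num = decimal_num // 2  # Step 2: Divide by 2
--
--     # If the input number is 0, the binary representation is "0"
--     if binary_num == "":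
--         binary_num = "1"
--
--     # Step 5: Convert binary string to integer
--     # binary_integer = int(binary_num)
--
--     return binary_num
-- ===== SOURCE B (Python) =====
-- def decimal_to_Complement(decimal_num):
--     if decimal_num <= 0:
--         return "1"
--     k = decimal_num.bit_length()
--     return format((1 << k) - 1 - decimal_num, "b").zfill(k)
-- ===== Notes on version B (the rewrite author's own statement) =====
-- stated objective: idiomatic
-- what changed: B replaces A's divide-and-flip-each-remainder string-prepending loop by a loop-free closed form: take the arithmetic complement of the input below two to the bit_length and render it with format(..., 'b') plus zfill to that width.
import Mathlib
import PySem

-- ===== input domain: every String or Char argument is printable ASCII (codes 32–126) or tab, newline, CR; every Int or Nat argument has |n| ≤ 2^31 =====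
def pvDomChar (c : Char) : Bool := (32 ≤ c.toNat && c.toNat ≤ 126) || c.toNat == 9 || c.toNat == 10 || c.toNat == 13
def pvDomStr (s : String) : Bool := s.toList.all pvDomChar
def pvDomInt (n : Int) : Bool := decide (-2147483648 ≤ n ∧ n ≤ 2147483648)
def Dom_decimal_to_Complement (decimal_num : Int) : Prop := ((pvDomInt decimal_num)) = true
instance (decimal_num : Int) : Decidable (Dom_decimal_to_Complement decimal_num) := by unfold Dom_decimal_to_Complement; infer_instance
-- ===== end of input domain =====

-- B replaces A's divide-and-flip string-prepending loop by a loop-free closed form: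
-- the arithmetic complement of the input below 2^bit_length, rendered via format(..., 'b') and zfill.


-- ===== PORT A =====
-- Python str is modeled as List Char (PySem.Chars); the result is packed with String.ofList.
-- the while loop: state is (decimal_num, binary_num)
def pvALoop (decimal_num : Int) (binary_num : List Char) : List Char :=
  if 0 < decimal_num then
    pvALoop (PySem.Int.floordiv decimal_num 2)
      ((if PySem.Int.mod decimal_num 2 = 1 then ['0'] else ['1']) ++ binary_num)
  else binary_num
termination_by decimal_num.toNat
decreasing_by
  rw [PySem.Int.floordiv_eq_ediv_of_pos (by omega : (0:Int) < 2)]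
  omega

def decimal_to_Complement (decimal_num : Int) : String :=
  let binary_num := pvALoop decimal_num []
  if binary_num = [] then "1" else String.ofList binary_num

-- ===== PORT B =====
def decimal_to_Complement_alt (decimal_num : Int) : String :=
  if decimal_num ≤ 0 then "1"
  else
    PySem.Str.zfill
      (PySem.Int.toBin ((1 <<< PySem.Int.bitLength decimal_num) - 1 - decimal_num))
      (PySem.Int.bitLength decimal_num : Int)

-- ===== PRECONDITION & SPEC =====
def Spec_decimal_to_Complement (decimal_num : Int) (out : String) : Prop := out = decimal_to_Complement_alt decimal_num
instance (decimal_num : Int) (out : String) : Decidable (Spec_decimal_to_Complement decimal_num out) := by unfold Spec_decimal_to_Complement; infer_instance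

-- ===== CLAIM (what is proved, stated in full; the proofs are below) =====
def Claim_equal_decimal_to_Complement : Prop := ∀ (decimal_num : Int), Dom_decimal_to_Complement decimal_num → Spec_decimal_to_Complement decimal_num (decimal_to_Complement decimal_num)

-- ===== LEMMAS AND PROOFS =====

-- A's loop output for a positive m: the flipped binary digits of m, most significant first.
def pvFlipBits (m : Nat) : List Char :=
  if _h : m = 0 then [] else pvFlipBits (m / 2) ++ [if m % 2 = 1 then '0' else '1']
termination_by m
decreasing_by omega

-- binary digits of v (what Nat.toDigits 2 computes), fuel-free
def pvBinRep (v : Nat) : List Char :=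
  if _h : v < 2 then [Nat.digitChar v] else pvBinRep (v / 2) ++ [Nat.digitChar (v % 2)]
termination_by v
decreasing_by omega

-- binary digits with pvRawBin 0 = [] (absorbed by padding)
def pvRawBin (v : Nat) : List Char := if v = 0 then [] else pvBinRep v

theorem pvToDigitsCore_eq (f : Nat) : ∀ (v : Nat) (acc : List Char), v < f →
    Nat.toDigitsCore 2 f v acc = pvBinRep v ++ acc := by
  induction f with
  | zero => intro v acc h; omega
  | succ f ih =>
    intro v acc h
    rw [Nat.toDigitsCore]
    by_cases h2 : v / 2 = 0
    · rw [if_pos h2, pvBinRep, dif_pos (by omega : v < 2)]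
      have : v % 2 = v := by omega
      simp [this]
    · rw [if_neg h2, ih (v / 2) _ (by omega)]
      conv_rhs => rw [pvBinRep]
      rw [dif_neg (by omega : ¬ v < 2)]
      simp

theorem pvToDigits_eq (v : Nat) : Nat.toDigits 2 v = pvBinRep v := by
  have := pvToDigitsCore_eq (v + 1) v [] (by omega)
  simpa [Nat.toDigits] using this

theorem pvRawBin_rec (v : Nat) (hv : 0 < v) :
    pvRawBin v = pvRawBin (v / 2) ++ [Nat.digitChar (v % 2)] := by
  by_cases h2 : v < 2
  · have : v = 1 := by omega
    subst this
    simp [pvRawBin, pvBinRep]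
  · rw [pvRawBin, if_neg (by omega), pvRawBin, if_neg (by omega), pvBinRep, dif_neg h2]

theorem pvBinRep_chars (v : Nat) : ∀ c ∈ pvBinRep v, c = '0' ∨ c = '1' := by
  induction v using Nat.strong_induction_on with
  | _ v ih =>
    intro c hc
    rw [pvBinRep] at hc
    by_cases h2 : v < 2
    · rw [dif_pos h2] at hc
      have hcv : c = Nat.digitChar v := by simpa using hc
      have hv : v = 0 ∨ v = 1 := by omega
      rcases hv with h | h <;> subst h <;> rw [hcv]
      · left; decide
      · right; decide
    · rw [dif_neg h2] at hc
      rcases List.mem_append.mp hc with h | h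
      · exact ih (v / 2) (by omega) c h
      · have hv : v % 2 = 0 ∨ v % 2 = 1 := by omega
        have hcv : c = Nat.digitChar (v % 2) := by simpa using h
        rcases hv with h0 | h0 <;> rw [hcv, h0]
        · left; decide
        · right; decide

theorem pvBinRep_ne_nil (v : Nat) : pvBinRep v ≠ [] := by
  rw [pvBinRep]
  by_cases h2 : v < 2
  · simp [h2]
  · simp [h2]

-- zfill on a list shorter than the width, first char not a sign
theorem pvZfill_pad (c : Char) (rest : List Char) (k : Nat) (hc : ¬(c = '+' ∨ c = '-'))
    (hlen : (c :: rest).length < k) :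
    PySem.Chars.zfill (c :: rest) (k : Int) =
      List.replicate (k - (c :: rest).length) '0' ++ (c :: rest) := by
  unfold PySem.Chars.zfill
  rw [if_neg (by omega)]
  simp only [hc, if_false]
  have h2 : ((k : Int)).toNat = k := by omega
  rw [h2]

theorem pvZfill_le (cs : List Char) (k : Nat) (h : cs.length ≥ k) :
    PySem.Chars.zfill cs (k : Int) = cs := by
  unfold PySem.Chars.zfill
  rw [if_pos (by omega)]

-- zfill of the binary digits equals explicit left-padding with pvRawBin
theorem pvZfill_eq (v k : Nat) (hk : 0 < k) :
    PySem.Chars.zfill (Nat.toDigits 2 v) (k : Int) =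
      List.replicate (k - (pvRawBin v).length) '0' ++ pvRawBin v := by
  rw [pvToDigits_eq]
  by_cases hv : v = 0
  · subst hv
    have hb : pvBinRep 0 = ['0'] := by rw [pvBinRep]; rfl
    rw [hb]
    rw [show pvRawBin 0 = [] from by rw [pvRawBin]; rfl]
    simp only [List.length_nil, Nat.sub_zero, List.append_nil]
    by_cases h1 : k ≤ 1
    · have hk1 : k = 1 := by omega
      subst hk1
      rw [pvZfill_le _ _ (by simp)]
      rfl
    · rw [pvZfill_pad '0' [] k (by decide) (by simp; omega)]
      have hsplit : k = (k - 1) + 1 := by omega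
      conv_rhs => rw [hsplit, List.replicate_succ']
      simp
  · have hne : pvBinRep v ≠ [] := pvBinRep_ne_nil v
    obtain ⟨c, rest, hc⟩ : ∃ c rest, pvBinRep v = c :: rest := by
      cases h : pvBinRep v with
      | nil => exact absurd h hne
      | cons a l => exact ⟨a, l, rfl⟩
    have hcd : c = '0' ∨ c = '1' := pvBinRep_chars v c (by rw [hc]; exact List.mem_cons_self)
    have hcs : ¬(c = '+' ∨ c = '-') := by rcases hcd with h | h <;> subst h <;> decide
    rw [pvRawBin, if_neg hv, hc]
    by_cases h1 : (c :: rest).length ≥ k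
    · rw [pvZfill_le _ _ h1]
      have h0 : k - (c :: rest).length = 0 := by omega
      rw [h0]
      simp
    · rw [pvZfill_pad c rest k hcs (by omega)]

-- the key arithmetic fact: padding the binary digits of 2^K - 1 - m to width K = bitLength m
-- gives exactly the flipped binary digits of m
theorem pvMain (m : Nat) (hm : 0 < m) :
    List.replicate (PySem.Int.bitLength (m : Int) - (pvRawBin (2 ^ PySem.Int.bitLength (m : Int) - 1 - m)).length) '0'
      ++ pvRawBin (2 ^ PySem.Int.bitLength (m : Int) - 1 - m) = pvFlipBits m := by
  induction m using Nat.strong_induction_on with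
  | _ m ih =>
    by_cases h1 : m = 1
    · subst h1
      have hf1 : pvFlipBits 1 = ['0'] := by
        rw [pvFlipBits, dif_neg (by omega : ¬ (1:Nat) = 0)]
        show pvFlipBits 0 ++ ['0'] = ['0']
        rw [pvFlipBits, dif_pos rfl]
        rfl
      simp only [Nat.cast_one]
      rw [show PySem.Int.bitLength (1 : Int) = 1 from by decide,
          show (2:Nat) ^ 1 - 1 - 1 = 0 from by norm_num,
          show pvRawBin 0 = [] from by rw [pvRawBin]; rfl, hf1]
      rfl
    · have hm2 : 2 ≤ m := by omega
      set m' := m / 2 with hm'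
      have hm'pos : 0 < m' := by omega
      have hK : PySem.Int.bitLength (m : Int) = PySem.Int.bitLength (m' : Int) + 1 :=
        PySem.Int.bitLength_natCast hm
      set k' := PySem.Int.bitLength (m' : Int) with hk'
      have hlt : m < 2 ^ (k' + 1) := by
        have := PySem.Int.lt_two_pow_bitLength (m : Int)
        rwa [hK, Int.natAbs_natCast] at this
      have hlt' : m' < 2 ^ k' := by
        have := PySem.Int.lt_two_pow_bitLength (m' : Int)
        rwa [Int.natAbs_natCast] at this
      have hpow : 2 ^ (k' + 1) = 2 * 2 ^ k' := by ring
      set b := m % 2 with hb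
      have hv : 2 ^ (k' + 1) - 1 - m = 2 * (2 ^ k' - 1 - m') + (1 - b) := by omega
      have ihm := ih m' (by omega) hm'pos
      rw [← hk'] at ihm
      rw [hK, hv]
      set v' := 2 ^ k' - 1 - m' with hv'
      rw [pvFlipBits, dif_neg (by omega : ¬ m = 0)]
      rw [← hm', ← hb, ← ihm]
      by_cases hz : 2 * v' + (1 - b) = 0
      · -- v = 0 : then v' = 0 and b = 1
        have hv'0 : v' = 0 := by omega
        have hb1 : b = 1 := by omega
        rw [hz, hv'0, hb1]
        rw [show pvRawBin 0 = [] from by rw [pvRawBin]; rfl]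
        simp only [List.length_nil, Nat.sub_zero, List.append_nil, if_true]
        rw [List.replicate_succ']
      · -- v > 0
        have hvpos : 0 < 2 * v' + (1 - b) := by omega
        rw [pvRawBin_rec _ hvpos]
        have hdiv : (2 * v' + (1 - b)) / 2 = v' := by omega
        have hmod : (2 * v' + (1 - b)) % 2 = 1 - b := by omega
        rw [hdiv, hmod]
        have hlen : (pvRawBin v' ++ [Nat.digitChar (1 - b)]).length = (pvRawBin v').length + 1 := by
          simp
        rw [hlen]
        have hsub : k' + 1 - ((pvRawBin v').length + 1) = k' - (pvRawBin v').length := by omega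
        rw [hsub]
        have hdig : Nat.digitChar (1 - b) = if b = 1 then '0' else '1' := by
          have : b = 0 ∨ b = 1 := by omega
          rcases this with h | h <;> simp [h, Nat.digitChar]
        rw [hdig, List.append_assoc]

-- A's loop unrolled
theorem pvALoop_eq (m : Nat) : ∀ acc : List Char, pvALoop (m : Int) acc = pvFlipBits m ++ acc := by
  induction m using Nat.strong_induction_on with
  | _ m ih =>
    intro acc
    by_cases hm : m = 0
    · subst hm
      rw [pvALoop, if_neg (by omega), pvFlipBits]
      simp
    · rw [pvALoop, if_pos (by exact_mod_cast Nat.pos_of_ne_zero hm)]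
      rw [PySem.Int.floordiv_eq_ediv_of_pos (by omega : (0:Int) < 2),
          PySem.Int.mod_eq_emod_of_pos (by omega : (0:Int) < 2)]
      rw [show ((m : Int)) / 2 = ((m / 2 : Nat) : Int) from by omega,
          show ((m : Int)) % 2 = ((m % 2 : Nat) : Int) from by omega]
      rw [ih (m / 2) (by omega)]
      conv_rhs => rw [pvFlipBits]
      rw [dif_neg hm]
      have hcond : (((m % 2 : Nat) : Int) = 1) ↔ (m % 2 = 1) := by omega
      by_cases h : m % 2 = 1
      · rw [if_pos (hcond.mpr h), if_pos h]; simp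
      · rw [if_neg (fun hh => h (hcond.mp hh)), if_neg h]; simp

theorem pvALoop_nonpos (n : Int) (hn : n ≤ 0) (acc : List Char) : pvALoop n acc = acc := by
  rw [pvALoop, if_neg (by omega)]

theorem pvFlipBits_ne_nil (m : Nat) (hm : 0 < m) : pvFlipBits m ≠ [] := by
  rw [pvFlipBits, dif_neg (by omega : ¬ m = 0)]
  simp

-- ===== VERDICT (by name: the statement is the Claim_ definition above) =====
theorem decimal_to_Complement_spec : Claim_equal_decimal_to_Complement := by
  intro n _
  unfold Spec_decimal_to_Complement decimal_to_Complement decimal_to_Complement_alt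
  by_cases hn : n ≤ 0
  · rw [if_pos hn, pvALoop_nonpos n hn]
    simp
  · rw [if_neg hn]
    have hn' : 0 < n := by omega
    set m := n.toNat with hm
    have hnm : (m : Int) = n := by omega
    have hmpos : 0 < m := by omega
    rw [← hnm, pvALoop_eq m []]
    rw [List.append_nil, if_neg (pvFlipBits_ne_nil m hmpos)]
    -- B side
    have hkpos : 0 < PySem.Int.bitLength (m : Int) := by
      by_contra h
      have hlt := PySem.Int.lt_two_pow_bitLength (m : Int)
      rw [Int.natAbs_natCast, show PySem.Int.bitLength (m : Int) = 0 from by omega] at hlt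
      simp at hlt
      omega
    have hmlt : m < 2 ^ PySem.Int.bitLength (m : Int) := by
      have := PySem.Int.lt_two_pow_bitLength (m : Int)
      rwa [Int.natAbs_natCast] at this
    have hshift : ((1 <<< PySem.Int.bitLength (m : Int) : Nat) : Int)
        = ((2 ^ PySem.Int.bitLength (m : Int) : Nat) : Int) := by
      norm_num [Nat.shiftLeft_eq]
    have hval : ((1 <<< PySem.Int.bitLength (m : Int) : Nat) : Int) - 1 - (m : Int)
        = ((2 ^ PySem.Int.bitLength (m : Int) - 1 - m : Nat) : Int) := by
      rw [hshift]
      omega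
    rw [hval]
    have htb : PySem.Int.toBinChars ((2 ^ PySem.Int.bitLength (m : Int) - 1 - m : Nat) : Int)
        = Nat.toDigits 2 (2 ^ PySem.Int.bitLength (m : Int) - 1 - m) := by
      rw [PySem.Int.toBinChars, if_neg (by omega)]
      simp
    rw [PySem.Str.zfill, PySem.Int.toList_toBin, htb, pvZfill_eq _ _ hkpos,
        pvMain m hmpos]
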